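-- pv_equiv track=rewrite | github.com/Pet3r1512/AdventOfCode | Day2/index.py | check
-- ===== SOURCE A (Python) =====
-- def check(arr: list[int]):
--     if len(arr) < 2:
--         return True
--
--     for i in range(len(arr) - 1):
--         gap = arr[i + 1] - arr[i]
--
--         if(abs(gap) < 1 or abs(gap) > 3):
--             return False
--
--     isAscending = all(arr[i] <= arr[i + 1] for i in range(len(arr) - 1))
--     isDescending = all(arr[i] >= arr[i + 1] for i in range(len(arr) - 1))
--     return isAscending or isDescending
-- ===== SOURCE B (Python) =====
-- def check(arr: list[int]):
--     diffs = [b - a for a, b in zip(arr, arr[1:])]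
--     return all(1 <= d <= 3 for d in diffs) or all(-3 <= d <= -1 for d in diffs)
-- ===== Notes on version B (the rewrite author's own statement) =====
-- stated objective: simpler
-- what changed: Replaces the three constraint-specific passes (gap loop with early return, ascending scan, descending scan) by one adjacent-difference list and two fused range checks 1<=d<=3 / -3<=d<=-1.
import Mathlib
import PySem

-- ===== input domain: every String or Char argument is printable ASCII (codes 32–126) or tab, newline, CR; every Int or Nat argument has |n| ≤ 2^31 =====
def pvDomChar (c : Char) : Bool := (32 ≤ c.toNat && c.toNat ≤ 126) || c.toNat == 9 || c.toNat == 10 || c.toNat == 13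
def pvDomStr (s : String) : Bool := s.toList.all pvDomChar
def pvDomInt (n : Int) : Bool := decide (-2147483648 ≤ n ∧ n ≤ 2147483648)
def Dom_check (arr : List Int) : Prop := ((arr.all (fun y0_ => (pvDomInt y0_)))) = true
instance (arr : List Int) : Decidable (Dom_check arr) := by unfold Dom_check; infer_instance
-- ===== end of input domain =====

-- B replaces A's three constraint-specific passes by one adjacent-difference list
-- and two fused range checks (objective: simpler).

-- ===== PORT A =====
-- the for-loop with early `return False`; indices from range(len-1) are always
-- in range, so pyGetD with default 0 is exact here
def checkGapLoop (arr : List Int) : List Int → Bool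
  | [] => true
  | i :: rest =>
    let gap := PySem.List.pyGetD arr (i + 1) 0 - PySem.List.pyGetD arr i 0
    if gap.natAbs < 1 ∨ gap.natAbs > 3 then false else checkGapLoop arr rest

def check (arr : List Int) : Bool :=
  if arr.length < 2 then true
  else if checkGapLoop arr (PySem.List.pyRange 0 ((arr.length : Int) - 1) 1) then
    let isAscending := (PySem.List.pyRange 0 ((arr.length : Int) - 1) 1).all
      (fun i => PySem.List.pyGetD arr i 0 ≤ PySem.List.pyGetD arr (i + 1) 0)
    let isDescending := (PySem.List.pyRange 0 ((arr.length : Int) - 1) 1).all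
      (fun i => PySem.List.pyGetD arr i 0 ≥ PySem.List.pyGetD arr (i + 1) 0)
    isAscending || isDescending
  else false

-- ===== PORT B =====
def check_alt (arr : List Int) : Bool :=
  let diffs := (arr.zip arr.tail).map (fun p => p.2 - p.1)
  (diffs.all fun d => decide (1 ≤ d) && decide (d ≤ 3)) ||
  (diffs.all fun d => decide (-3 ≤ d) && decide (d ≤ -1))

-- ===== PRECONDITION & SPEC =====
def Spec_check (arr : List Int) (out : Bool) : Prop := out = check_alt arr
instance (arr : List Int) (out : Bool) : Decidable (Spec_check arr out) := by unfold Spec_check; infer_instance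

-- ===== CLAIM (what is proved, stated in full; the proofs are below) =====
def Claim_equal_check : Prop := ∀ (arr : List Int), Dom_check arr → Spec_check arr (check arr)

-- ===== LEMMAS AND PROOFS =====

-- the early-return gap loop is just `all` of its test
theorem checkGapLoop_eq_all (arr : List Int) (l : List Int) :
    checkGapLoop arr l
      = l.all (fun i =>
          !(decide ((PySem.List.pyGetD arr (i + 1) 0 - PySem.List.pyGetD arr i 0).natAbs < 1
            ∨ (PySem.List.pyGetD arr (i + 1) 0 - PySem.List.pyGetD arr i 0).natAbs > 3))) := by
  induction l with
  | nil => rfl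
  | cons i rest ih =>
    simp only [checkGapLoop, List.all_cons]
    split_ifs with h
    · rw [decide_eq_true h, Bool.not_true, Bool.false_and]
    · rw [decide_eq_false h, Bool.not_false, Bool.true_and, ih]

-- the nat-indexed form of the index-loop/zip bridge
theorem all_range_eq_all_zip (f : Int → Int → Bool) (arr : List Int) :
    (List.range (arr.length - 1)).all (fun k => f (arr.getD k 0) (arr.getD (k + 1) 0))
      = (arr.zip arr.tail).all (fun p => f p.1 p.2) := by
  induction arr with
  | nil => rfl
  | cons a t ih =>
    cases t with
    | nil => rfl
    | cons b t' =>
      have h : (a :: b :: t' : List Int).length - 1 = ((b :: t').length - 1) + 1 := by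
        simp
      rw [h, List.range_succ_eq_map]
      simp only [List.all_cons, List.all_map, Function.comp_def, Nat.succ_eq_add_one,
        List.getD_cons_succ, List.getD_cons_zero, List.tail_cons, List.zip_cons_cons] at ih ⊢
      rw [ih]

-- index-based `all` over range(len-1) equals `all` over zip(arr, arr[1:])
theorem all_pyRange_eq_all_zip (f : Int → Int → Bool) (arr : List Int) :
    (PySem.List.pyRange 0 ((arr.length : Int) - 1) 1).all
        (fun i => f (PySem.List.pyGetD arr i 0) (PySem.List.pyGetD arr (i + 1) 0))
      = (arr.zip arr.tail).all (fun p => f p.1 p.2) := by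
  rw [PySem.List.pyRange_one]
  have h : (((arr.length : Int) - 1) - 0).toNat = arr.length - 1 := by omega
  rw [h, List.all_map, ← all_range_eq_all_zip f arr]
  refine List.all_congr rfl ?_
  intro k
  show f (PySem.List.pyGetD arr (0 + (k : Int)) 0) (PySem.List.pyGetD arr (0 + (k : Int) + 1) 0)
      = f (arr.getD k 0) (arr.getD (k + 1) 0)
  have h1 : (0 : Int) + (k : Int) = ((k : Nat) : Int) := by ring
  rw [h1]
  have h2 : ((k : Nat) : Int) + 1 = (((k + 1 : Nat)) : Int) := by push_cast; ring
  rw [h2, PySem.List.pyGetD_natCast, PySem.List.pyGetD_natCast]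

-- the boolean combination: gaps-in-magnitude ∧ (ascending ∨ descending)
-- equals the two fused range checks
theorem fused_ranges (Z : List (Int × Int)) :
    ((Z.all fun p => !(decide ((p.2 - p.1).natAbs < 1 ∨ (p.2 - p.1).natAbs > 3)))
      && ((Z.all fun p => decide (p.1 ≤ p.2)) || (Z.all fun p => decide (p.2 ≤ p.1))))
    = ((Z.all fun p => decide (1 ≤ p.2 - p.1) && decide (p.2 - p.1 ≤ 3))
      || (Z.all fun p => decide (-3 ≤ p.2 - p.1) && decide (p.2 - p.1 ≤ -1))) := by
  rw [Bool.eq_iff_iff]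
  simp only [Bool.and_eq_true, Bool.or_eq_true, List.all_eq_true, Bool.not_eq_eq_eq_not,
    Bool.not_true, decide_eq_false_iff_not, decide_eq_true_eq, not_or]
  constructor
  · rintro ⟨hg, ha | hd⟩
    · exact Or.inl (fun p hp => by have := hg p hp; have := ha p hp; omega)
    · exact Or.inr (fun p hp => by have := hg p hp; have := hd p hp; omega)
  · rintro (hp | hn)
    · exact ⟨fun p h => by have := hp p h; omega, Or.inl (fun p h => by have := hp p h; omega)⟩
    · exact ⟨fun p h => by have := hn p h; omega, Or.inr (fun p h => by have := hn p h; omega)⟩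

theorem check_eq_check_alt (arr : List Int) : check arr = check_alt arr := by
  unfold check check_alt
  by_cases hlen : arr.length < 2
  · match arr, hlen with
    | [], _ => simp
    | [a], _ => simp
  · simp only [if_neg hlen]
    rw [checkGapLoop_eq_all,
      all_pyRange_eq_all_zip (fun a b => !(decide ((b - a).natAbs < 1 ∨ (b - a).natAbs > 3))),
      all_pyRange_eq_all_zip (fun a b => decide (a ≤ b)),
      all_pyRange_eq_all_zip (fun a b => decide (b ≤ a))]
    simp only [List.all_map, Function.comp_def]
    rw [← fused_ranges (arr.zip arr.tail)]
    split_ifs with h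
    · rw [h, Bool.true_and]
    · simp only [Bool.not_eq_true] at h
      rw [h, Bool.false_and]

-- ===== VERDICT (by name: the statement is the Claim_ definition above) =====
theorem check_spec : Claim_equal_check := by
  intro arr _
  unfold Spec_check
  exact check_eq_check_alt arr
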